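-- pv_equiv track=rewrite | github.com/ilmaruk/pysms | pysms/creators/team.py | shorten_team_name
-- ===== SOURCE A (Python) =====
-- SHORT_LEN = 4
--
-- def shorten_team_name(name: str) -> str:
--     vowels = "aeijouy"
--     short = name[0].lower()
--     for char in name[1:]:
--         if char not in vowels:
--             short += char
--             if len(short) == SHORT_LEN:
--                 return short
--     for char in name[1:]:
--         if char in vowels:
--             short += char
--             if len(short) == SHORT_LEN:
--                 return short
--     return short + "x" * (SHORT_LEN - len(short))
-- ===== SOURCE B (Python) =====
-- SHORT_LEN = 4
--
-- def shorten_team_name(name: str) -> str: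
--     vowels = "aeijouy"
--     cons = []
--     vows = []
--     for char in name[1:]:
--         (vows if char in vowels else cons).append(char)
--     full = name[0].lower() + "".join(cons) + "".join(vows)
--     return (full + "x" * SHORT_LEN)[:SHORT_LEN]
-- ===== Notes on version B (the rewrite author's own statement) =====
-- stated objective: simpler
-- what changed: Replaces A's two early-exit scans (consonants then vowels, returning mid-loop at length 4) by one partition pass into consonant/vowel lists, then a single concatenate, pad-with-x and slice to 4.
import Mathlib
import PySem

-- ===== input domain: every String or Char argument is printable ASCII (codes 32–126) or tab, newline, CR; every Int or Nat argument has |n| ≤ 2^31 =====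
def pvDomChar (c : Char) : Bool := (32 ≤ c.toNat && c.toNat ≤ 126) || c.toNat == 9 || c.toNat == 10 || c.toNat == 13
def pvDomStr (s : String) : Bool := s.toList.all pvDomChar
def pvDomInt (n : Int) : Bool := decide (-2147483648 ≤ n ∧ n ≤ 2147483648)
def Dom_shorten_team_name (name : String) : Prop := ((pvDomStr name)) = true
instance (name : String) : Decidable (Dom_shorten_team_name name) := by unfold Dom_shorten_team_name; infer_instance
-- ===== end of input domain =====

-- B replaces A's two early-exit scans by one partition pass plus concatenate/pad/slice (objective: simpler).

-- ===== PORT A =====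
-- one of A's scans: append chars satisfying p, return early (inl) when length hits 4
def pvA_loop (p : Char → Bool) : List Char → List Char → List Char ⊕ List Char
  | acc, [] => Sum.inr acc
  | acc, c :: cs =>
    if p c then
      let acc' := acc ++ [c]
      if acc'.length = 4 then Sum.inl acc' else pvA_loop p acc' cs
    else pvA_loop p acc cs

def shorten_team_name (name : String) : String :=
  let vowels : List Char := "aeijouy".toList
  match name.toList with
  | [] => ""  -- Python raises IndexError on name[0]; excluded by Pre_
  | c :: rest =>
    let short := [PySem.Chars.lowerChar c]
    match pvA_loop (fun ch => !(vowels.contains ch)) short rest with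
    | Sum.inl r => String.ofList r
    | Sum.inr acc =>
      match pvA_loop (fun ch => vowels.contains ch) acc rest with
      | Sum.inl r => String.ofList r
      | Sum.inr acc2 => String.ofList (acc2 ++ List.replicate (4 - acc2.length) 'x')

-- ===== PORT B =====
def shorten_team_name_alt (name : String) : String :=
  let vowels : List Char := "aeijouy".toList
  match name.toList with
  | [] => ""  -- Python raises IndexError on name[0]; excluded by Pre_
  | c :: rest =>
    -- single partition pass (Source B's for-loop appending into cons / vows)
    let cv := rest.foldl
      (fun (p : List Char × List Char) ch =>
        if vowels.contains ch then (p.1, p.2 ++ [ch]) else (p.1 ++ [ch], p.2))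
      ([], [])
    let full := PySem.Chars.lowerChar c :: (cv.1 ++ cv.2)
    String.ofList ((full ++ List.replicate 4 'x').take 4)

-- ===== PRECONDITION & SPEC =====
-- A raises IndexError on the empty string (name[0]); Pre_ excludes exactly that input.
def Pre_shorten_team_name (name : String) : Prop := name ≠ ""
instance (name : String) : Decidable (Pre_shorten_team_name name) := by unfold Pre_shorten_team_name; infer_instance
def pvWitness_shorten_team_name : String := "Lions"

def Spec_shorten_team_name (name : String) (out : String) : Prop := out = shorten_team_name_alt name
instance (name : String) (out : String) : Decidable (Spec_shorten_team_name name out) := by unfold Spec_shorten_team_name; infer_instance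

-- ===== CLAIM (what is proved, stated in full; the proofs are below) =====
def Claim_equal_shorten_team_name : Prop := ∀ (name : String), Dom_shorten_team_name name → Pre_shorten_team_name name → Spec_shorten_team_name name (shorten_team_name name)

-- ===== LEMMAS AND PROOFS =====

-- A's early-exit scan characterised: it computes acc ++ filter p, truncated at 4 with early return.
theorem pvA_loop_eq (p : Char → Bool) (cs : List Char) :
    ∀ acc : List Char, acc.length < 4 →
    pvA_loop p acc cs =
      if 4 ≤ acc.length + (cs.filter p).length
      then Sum.inl ((acc ++ cs.filter p).take 4)
      else Sum.inr (acc ++ cs.filter p) := by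
  induction cs with
  | nil =>
    intro acc h
    simp [pvA_loop]
    omega
  | cons c cs ih =>
    intro acc h
    by_cases hp : p c
    · by_cases h4 : acc.length + 1 = 4
      · have : (pvA_loop p acc (c :: cs)) = Sum.inl (acc ++ [c]) := by
          simp [pvA_loop, hp, h4]
        rw [this]
        have hlen : 4 ≤ acc.length + ((c :: cs).filter p).length := by
          simp [List.filter, hp]; omega
        rw [if_pos hlen]
        have : acc ++ (c :: cs).filter p = (acc ++ [c]) ++ cs.filter p := by
          simp [List.filter, hp]
        rw [this, List.take_append]
        have h1 : (acc ++ [c]).length = 4 := by simp; omega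
        simp [h1]
      · have hstep : pvA_loop p acc (c :: cs) = pvA_loop p (acc ++ [c]) cs := by
          simp [pvA_loop, hp]
          intro hc; exfalso; apply h4; simpa using hc
        rw [hstep, ih (acc ++ [c]) (by simp; omega),
          show (acc ++ [c]) ++ List.filter p cs = acc ++ List.filter p (c :: cs) from by
            simp [List.filter_cons, hp],
          show (acc ++ [c]).length + (List.filter p cs).length
              = acc.length + (List.filter p (c :: cs)).length from by
            simp [List.filter_cons, hp]; omega]
    · have hstep : pvA_loop p acc (c :: cs) = pvA_loop p acc cs := by
        simp [pvA_loop, hp]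
      rw [hstep, ih acc h]
      simp [List.filter_cons, hp]

-- the partition fold of B is the pair of filters
theorem pvB_fold_eq (vowels : List Char) (rest : List Char) :
    ∀ (c v : List Char),
    rest.foldl
      (fun (p : List Char × List Char) ch =>
        if vowels.contains ch then (p.1, p.2 ++ [ch]) else (p.1 ++ [ch], p.2))
      (c, v)
    = (c ++ rest.filter (fun ch => !(vowels.contains ch)),
       v ++ rest.filter (fun ch => vowels.contains ch)) := by
  induction rest with
  | nil => intro c v; simp
  | cons x xs ih =>
    intro c v
    by_cases hx : vowels.contains x
    · simp only [List.foldl_cons, List.filter_cons, hx, Bool.not_true, if_true,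
        Bool.false_eq_true, if_false, ih]
      simp
    · simp only [List.foldl_cons, List.filter_cons, hx, Bool.not_false,
        Bool.false_eq_true, if_false, if_true, ih]
      simp

-- ===== VERDICT (by name: the statement is the Claim_ definition above) =====
theorem shorten_team_name_spec : Claim_equal_shorten_team_name := by
  intro name _ hpre
  unfold Spec_shorten_team_name shorten_team_name shorten_team_name_alt
  match hm : name.toList with
  | [] => exact absurd (String.toList_eq_nil_iff.mp hm) hpre
  | c :: rest =>
    simp only []
    rw [pvB_fold_eq]
    simp only [List.nil_append]
    set vowels : List Char := "aeijouy".toList with hv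
    set lc := PySem.Chars.lowerChar c with hlc
    set cons := rest.filter (fun ch => !(vowels.contains ch)) with hcons
    set vows := rest.filter (fun ch => vowels.contains ch) with hvows
    by_cases h1 : 4 ≤ [lc].length + cons.length
    · have hA1 : pvA_loop (fun ch => !(vowels.contains ch)) [lc] rest
          = Sum.inl (([lc] ++ cons).take 4) := by
        rw [pvA_loop_eq _ _ [lc] (by simp)]; rw [if_pos h1]
      simp only [hA1]
      -- early return in the consonant scan: both sides are the 4-prefix of lc :: cons ++ vows ++ pad
      congr 1
      have he : (lc :: (cons ++ vows)) ++ List.replicate 4 'x'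
           = ([lc] ++ cons) ++ (vows ++ List.replicate 4 'x') := by simp
      have hge : 4 ≤ ([lc] ++ cons).length := by simp at h1 ⊢; omega
      rw [he, List.take_append_of_le_length hge]
    · have hA1 : pvA_loop (fun ch => !(vowels.contains ch)) [lc] rest
          = Sum.inr ([lc] ++ cons) := by
        rw [pvA_loop_eq _ _ [lc] (by simp)]; rw [if_neg h1]
      simp only [hA1]
      by_cases h2 : 4 ≤ ([lc] ++ cons).length + vows.length
      · have hA2 : pvA_loop (fun ch => vowels.contains ch) ([lc] ++ cons) rest
            = Sum.inl ((([lc] ++ cons) ++ vows).take 4) := by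
          rw [pvA_loop_eq _ _ ([lc] ++ cons) (by simp at h1 ⊢; omega)]; rw [if_pos h2]
        simp only [hA2]
        congr 1
        have he : (lc :: (cons ++ vows)) ++ List.replicate 4 'x'
             = (([lc] ++ cons) ++ vows) ++ List.replicate 4 'x' := by simp
        have hge : 4 ≤ (([lc] ++ cons) ++ vows).length := by simp at h2 ⊢; omega
        rw [he, List.take_append_of_le_length hge]
      · have hA2 : pvA_loop (fun ch => vowels.contains ch) ([lc] ++ cons) rest
            = Sum.inr (([lc] ++ cons) ++ vows) := by
          rw [pvA_loop_eq _ _ ([lc] ++ cons) (by simp at h1 ⊢; omega)]; rw [if_neg h2]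
        simp only [hA2]
        congr 1
        have he : (lc :: (cons ++ vows)) ++ List.replicate 4 'x'
             = (([lc] ++ cons) ++ vows) ++ List.replicate 4 'x' := by simp
        have hle : (([lc] ++ cons) ++ vows).length ≤ 4 := by
          simp at h2 ⊢; omega
        rw [he, List.take_append, List.take_of_length_le hle, List.take_replicate]
        congr 1
        simp [hcons, hvows]
        omega
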